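-- pv_equiv track=rewrite | github.com/materialsproject/emmet | emmet-builders/emmet/builders/utils.py | chemsys_permutations
-- ===== SOURCE A (Python) =====
-- from itertools import chain, combinations
--
-- def chemsys_permutations(chemsys) -> set[str]:
--     # Function to get all relevant chemical subsystems
--     # e.g. for Li-Mn-O returns Li, Li-Mn, Li-Mn-O, Li-O, Mn, Mn-O, O
--     elements = chemsys.split("-")
--     return {
--         "-".join(sorted(c))
--         for c in chain(
--             *[combinations(elements, i) for i in range(1, len(elements) + 1)]
--         )
--     }
-- ===== SOURCE B (Python) =====
-- def _extensions(subset, rest):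
--     # all one-element extensions of subset by a later element, with its remaining suffix
--     if not rest:
--         return []
--     return [(subset + [rest[0]], rest[1:])] + _extensions(subset, rest[1:])
--
-- def chemsys_permutations(chemsys):
--     # Layered dynamic programming over the subset lattice: each layer of size-k
--     # subsystems is extended to the size-(k+1) layer, accumulating joined names.
--     elements = chemsys.split("-")
--     out = set()
--     layer = [([], elements)]
--     for _ in range(len(elements)):
--         nxt = []
--         for subset, rest in layer:
--             for s, r in _extensions(subset, rest):
--                 out.add("-".join(sorted(s)))
--                 nxt.append((s, r))
--         layer = nxt
--     return out
-- ===== Notes on version B (the rewrite author's own statement) =====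
-- stated objective: alternative
-- what changed: Replaces per-size itertools.combinations plus chain with a layered dynamic-programming sweep that extends each size-k subsystem (kept with its remaining element suffix) to the size-(k+1) layer, accumulating joined names in one pass.
import Mathlib
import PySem

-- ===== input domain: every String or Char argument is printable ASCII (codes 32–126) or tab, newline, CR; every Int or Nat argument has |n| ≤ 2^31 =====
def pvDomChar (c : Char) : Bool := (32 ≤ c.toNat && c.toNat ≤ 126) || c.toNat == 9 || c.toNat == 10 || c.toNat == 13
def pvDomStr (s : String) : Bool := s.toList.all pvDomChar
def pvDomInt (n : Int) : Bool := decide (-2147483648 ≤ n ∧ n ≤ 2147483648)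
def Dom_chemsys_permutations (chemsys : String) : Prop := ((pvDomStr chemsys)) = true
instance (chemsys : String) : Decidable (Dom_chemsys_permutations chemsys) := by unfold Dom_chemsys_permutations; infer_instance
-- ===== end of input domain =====

-- B replaces per-size itertools.combinations with layered extension of the subset lattice (alternative decomposition, same cost).

-- ===== PORT A =====
-- itertools.combinations(xs, k): k-element index-increasing selections in itertools' lexicographic order (hand port, exact)
def pvCombinations {α : Type} : List α → Nat → List (List α)
  | _, 0 => [[]]
  | [], _ + 1 => []
  | x :: rest, k + 1 =>
      (pvCombinations rest k).map (fun c => x :: c) ++ pvCombinations rest (k + 1)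

def chemsys_permutations (chemsys : String) : List String :=
  let elements := (PySem.Str.split? chemsys "-").getD []  -- sep "-" ≠ "", so split? is always some (exact)
  PySem.Set.ofList
    (((PySem.List.pyRange 1 ((elements.length : Int) + 1) 1).flatMap
        (fun i => pvCombinations elements i.toNat)).map
      (fun c => PySem.Str.join "-" (PySem.List.sorted c (fun x => x) false)))

-- ===== PORT B =====
-- _extensions(subset, rest) from Source B (structural recursion on rest, exact)
def pvExtensions (subset : List String) : List String → List (List String × List String)
  | [] => []
  | e :: rest => (subset ++ [e], rest) :: pvExtensions subset rest

def chemsys_permutations_alt (chemsys : String) : List String :=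
  let elements := (PySem.Str.split? chemsys "-").getD []  -- sep "-" ≠ "", so split? is always some (exact)
  let res := (PySem.List.pyRange 0 (elements.length : Int) 1).foldl
    (fun acc _ =>
      acc.2.foldl
        (fun acc2 sr =>
          (pvExtensions sr.1 sr.2).foldl
            (fun acc3 er =>
              (PySem.Set.add acc3.1
                 (PySem.Str.join "-" (PySem.List.sorted er.1 (fun x => x) false)),
               acc3.2 ++ [er]))
            acc2)
        (acc.1, ([] : List (List String × List String))))
    ((PySem.Set.empty : PySem.Set String), [(([] : List String), elements)])
  res.1

-- ===== PRECONDITION & SPEC =====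
def Spec_chemsys_permutations (chemsys : String) (out : List String) : Prop := out = chemsys_permutations_alt chemsys
instance (chemsys : String) (out : List String) : Decidable (Spec_chemsys_permutations chemsys out) := by unfold Spec_chemsys_permutations; infer_instance

-- ===== CLAIM (what is proved, stated in full; the proofs are below) =====
def Claim_equal_chemsys_permutations : Prop := ∀ (chemsys : String), Dom_chemsys_permutations chemsys → Spec_chemsys_permutations chemsys (chemsys_permutations chemsys)

-- ===== LEMMAS AND PROOFS =====

-- join "-" (sorted c), the string both programs record for a subsystem c
def pvJ (c : List String) : String := PySem.Str.join "-" (PySem.List.sorted c (fun x => x) false)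

-- combinations paired with the suffix of elements after the last chosen one
def pvCombP : List String → Nat → List (List String × List String)
  | xs, 0 => [([], xs)]
  | [], _ + 1 => []
  | x :: rest, k + 1 =>
      (pvCombP rest k).map (fun p => (x :: p.1, p.2)) ++ pvCombP rest (k + 1)

lemma pvCombP_fst : ∀ (xs : List String) (k : Nat),
    (pvCombP xs k).map Prod.fst = pvCombinations xs k := by
  intro xs
  induction xs with
  | nil => intro k; cases k <;> simp [pvCombP, pvCombinations]
  | cons x rest ih =>
      intro k
      cases k with
      | zero => simp [pvCombP, pvCombinations]
      | succ k =>
          simp [pvCombP, pvCombinations, ← ih, List.map_map]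

lemma pvCombP_ext : ∀ (xs : List String) (k : Nat) (s : List String),
    (pvCombP xs k).flatMap (fun p => pvExtensions (s ++ p.1) p.2)
      = (pvCombP xs (k + 1)).map (fun p => (s ++ p.1, p.2)) := by
  intro xs
  induction xs with
  | nil => intro k s; cases k <;> simp [pvCombP, pvExtensions]
  | cons x rest ih =>
      intro k s
      cases k with
      | zero =>
          simp only [pvCombP, List.flatMap_cons, List.flatMap_nil, List.append_nil,
            List.map_append, List.map_map]
          have h0 := ih 0 s
          simp only [pvCombP, List.flatMap_cons, List.flatMap_nil, List.append_nil] at h0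
          simp [pvExtensions, h0]
      | succ k =>
          have h1 := ih k (s ++ [x])
          have h2 := ih (k + 1) s
          simp only [pvCombP, List.flatMap_append, List.flatMap_map, List.map_append,
            List.map_map]
          rw [Function.comp_def]
          simp only [List.append_assoc, List.singleton_append] at h1 ⊢
          rw [h1, h2]

lemma pvCombP_ext_nil (xs : List String) (k : Nat) :
    (pvCombP xs k).flatMap (fun p => pvExtensions p.1 p.2) = pvCombP xs (k + 1) := by
  have := pvCombP_ext xs k []
  simpa using this

-- one extensions-fold in B: adds the joined strings and appends the extensions
lemma pvExtFold (exts : List (List String × List String))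
    (out : PySem.Set String) (nxt : List (List String × List String)) :
    exts.foldl
      (fun acc3 er => (PySem.Set.add acc3.1 (pvJ er.1), acc3.2 ++ [er])) (out, nxt)
      = (PySem.Set.update out (exts.map (fun er => pvJ er.1)), nxt ++ exts) := by
  induction exts generalizing out nxt with
  | nil => simp [PySem.Set.update]
  | cons e t ih => simp [ih, PySem.Set.update, List.append_assoc]

-- one layer pass in B
lemma pvLayerFold (L : List (List String × List String))
    (out : PySem.Set String) (nxt : List (List String × List String)) :
    L.foldl
      (fun acc2 sr =>
        (pvExtensions sr.1 sr.2).foldl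
          (fun acc3 er => (PySem.Set.add acc3.1 (pvJ er.1), acc3.2 ++ [er])) acc2)
      (out, nxt)
      = (PySem.Set.update out
          (L.flatMap (fun sr => (pvExtensions sr.1 sr.2).map (fun er => pvJ er.1))),
         nxt ++ L.flatMap (fun sr => pvExtensions sr.1 sr.2)) := by
  induction L generalizing out nxt with
  | nil => simp [PySem.Set.update]
  | cons p t ih =>
      simp only [List.foldl_cons, pvExtFold, ih, List.flatMap_cons]
      simp [PySem.Set.update, List.foldl_append, List.append_assoc]

-- the strings A records for sizes 1..k, in A's order
def pvStrs (elements : List String) (k : Nat) : List String :=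
  (List.range k).flatMap (fun i => (pvCombinations elements (i + 1)).map pvJ)

lemma pvStepLemma (elements : List String) (k : Nat) :
    ((PySem.Set.ofList (pvStrs elements k), pvCombP elements k).2.foldl
        (fun acc2 sr =>
          (pvExtensions sr.1 sr.2).foldl
            (fun acc3 er => (PySem.Set.add acc3.1 (pvJ er.1), acc3.2 ++ [er])) acc2)
        ((PySem.Set.ofList (pvStrs elements k), pvCombP elements k).1,
         ([] : List (List String × List String))))
      = (PySem.Set.ofList (pvStrs elements (k + 1)), pvCombP elements (k + 1)) := by
  rw [pvLayerFold]
  have hstrs : (pvCombP elements k).flatMap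
      (fun sr => (pvExtensions sr.1 sr.2).map (fun er => pvJ er.1))
      = (pvCombinations elements (k + 1)).map pvJ := by
    rw [← List.map_flatMap, pvCombP_ext_nil, ← pvCombP_fst, List.map_map]
    simp [Function.comp_def]
  rw [hstrs, pvCombP_ext_nil]
  have hof : ∀ (a b : List String),
      PySem.Set.update (PySem.Set.ofList a) b = PySem.Set.ofList (a ++ b) := by
    intro a b
    simp [PySem.Set.ofList_eq_foldl, PySem.Set.update, List.foldl_append]
  rw [hof]
  have : pvStrs elements (k + 1) = pvStrs elements k ++ (pvCombinations elements (k + 1)).map pvJ := by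
    simp [pvStrs, List.range_succ]
  rw [this]
  simp

lemma pvOuterInv (elements : List String) :
    ∀ (l : List Int) (k : Nat),
    l.foldl
      (fun acc (_ : Int) =>
        acc.2.foldl
          (fun acc2 sr =>
            (pvExtensions sr.1 sr.2).foldl
              (fun acc3 er => (PySem.Set.add acc3.1 (pvJ er.1), acc3.2 ++ [er])) acc2)
          (acc.1, ([] : List (List String × List String))))
      (PySem.Set.ofList (pvStrs elements k), pvCombP elements k)
      = (PySem.Set.ofList (pvStrs elements (k + l.length)), pvCombP elements (k + l.length)) := by
  intro l
  induction l with
  | nil => intro k; simp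
  | cons a t ih =>
      intro k
      rw [List.foldl_cons, pvStepLemma elements k, ih (k + 1)]
      simp only [List.length_cons]
      have h : k + 1 + t.length = k + (t.length + 1) := by omega
      rw [h]

theorem pv_main (chemsys : String) :
    chemsys_permutations chemsys = chemsys_permutations_alt chemsys := by
  unfold chemsys_permutations chemsys_permutations_alt
  set elements := (PySem.Str.split? chemsys "-").getD [] with helts
  have hB := pvOuterInv elements (PySem.List.pyRange 0 (elements.length : Int) 1) 0
  rw [PySem.List.length_pyRange_one, show ((elements.length : Int) - 0).toNat = elements.length by omega] at hB
  rw [show pvStrs elements 0 = [] by simp [pvStrs],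
      show pvCombP elements 0 = [(([] : List String), elements)] by simp [pvCombP],
      show PySem.Set.ofList ([] : List String) = (PySem.Set.empty : PySem.Set String) from rfl] at hB
  simp only [pvJ] at hB
  simp only []
  rw [hB]
  simp only [Nat.zero_add]
  congr 1
  -- A's recorded-string list equals pvStrs elements n
  rw [PySem.List.pyRange_one]
  rw [show (((elements.length : Int) + 1) - 1).toNat = elements.length by omega]
  rw [List.flatMap_map, List.map_flatMap]
  apply List.flatMap_congr
  intro i _
  rw [show ((1 : Int) + (i : Int)).toNat = i + 1 by omega]
  rfl

-- ===== VERDICT (by name: the statement is the Claim_ definition above) =====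
theorem chemsys_permutations_spec : Claim_equal_chemsys_permutations := by
  intro chemsys _
  exact pv_main chemsys
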